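-- pv_equiv track=rewrite | github.com/devqqmao/algorithms | 5. Graphs: dfs, 2SAT/solved_/dfs_K.py | get_sec
-- ===== SOURCE A (Python) =====
-- def get_sec(d, k):
--     if k == 1:
--         return [[str(i)] for i in range(d)]
--     sec = []
--     for subsec in get_sec(d, k-1):
--         for j in range(d):
--             sec.append(subsec + [str(j)])
--     return sec
-- ===== SOURCE B (Python) =====
-- def get_sec(d, k):
--     result = [[str(i)] for i in range(d)]
--     for _ in range(k - 1):
--         result = [r + [str(j)] for r in result for j in range(d)]
--     return result
-- ===== Notes on version B (the rewrite author's own statement) =====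
-- stated objective: simpler
-- what changed: Replaces A's recursion (k levels of calls, each appending in a nested loop) by a single iterative bottom-up accumulator: start from the d singleton lists and extend every partial list by one digit position per loop round.
import Mathlib
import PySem

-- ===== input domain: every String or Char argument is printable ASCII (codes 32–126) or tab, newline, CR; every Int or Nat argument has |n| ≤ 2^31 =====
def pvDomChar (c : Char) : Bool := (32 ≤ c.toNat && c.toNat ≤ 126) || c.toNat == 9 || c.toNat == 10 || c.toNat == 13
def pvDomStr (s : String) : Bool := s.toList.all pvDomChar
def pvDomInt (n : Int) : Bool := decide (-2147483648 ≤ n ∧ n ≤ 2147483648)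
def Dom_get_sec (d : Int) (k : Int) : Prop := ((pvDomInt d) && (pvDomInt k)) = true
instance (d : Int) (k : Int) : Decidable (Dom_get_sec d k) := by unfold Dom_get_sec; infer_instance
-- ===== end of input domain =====

-- B replaces A's recursive Cartesian-product construction by an iterative bottom-up accumulator
-- (same output, same order); proved equal for k >= 1 (A infinite-recurses for k <= 0).


-- ===== PORT A =====
-- recursion on k; Python infinite-recurses for k ≤ 0 (excluded by Pre_), the port returns [] there
def get_sec (d : Int) (k : Int) : List (List String) :=
  if k = 1 then (PySem.List.pyRange 0 d 1).map (fun i => [PySem.Int.toStr i])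
  else if k ≤ 1 then []   -- unreachable under Pre_get_sec (Python raises RecursionError)
  else (get_sec d (k - 1)).foldl
    (fun sec subsec =>
      (PySem.List.pyRange 0 d 1).foldl
        (fun sec j => sec ++ [subsec ++ [PySem.Int.toStr j]]) sec) []
termination_by k.toNat
decreasing_by omega

-- ===== PORT B =====
def get_sec_alt (d : Int) (k : Int) : List (List String) :=
  (PySem.List.pyRange 0 (k - 1) 1).foldl
    (fun result _ =>
      result.flatMap (fun r => (PySem.List.pyRange 0 d 1).map (fun j => r ++ [PySem.Int.toStr j])))
    ((PySem.List.pyRange 0 d 1).map (fun i => [PySem.Int.toStr i]))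

-- ===== PRECONDITION & SPEC =====
-- Pre_ excludes k ≤ 0, where Python A never returns (unbounded recursion / RecursionError).
def Pre_get_sec (d : Int) (k : Int) : Prop := 1 ≤ k
instance (d : Int) (k : Int) : Decidable (Pre_get_sec d k) := by unfold Pre_get_sec; infer_instance
def pvWitness_get_sec : Int × Int := (3, 2)
def Spec_get_sec (d : Int) (k : Int) (out : List (List String)) : Prop := out = get_sec_alt d k
instance (d : Int) (k : Int) (out : List (List String)) : Decidable (Spec_get_sec d k out) := by unfold Spec_get_sec; infer_instance

-- ===== CLAIM (what is proved, stated in full; the proofs are below) =====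
def Claim_equal_get_sec : Prop := ∀ (d : Int) (k : Int), Dom_get_sec d k → Pre_get_sec d k → Spec_get_sec d k (get_sec d k)

-- ===== LEMMAS AND PROOFS =====

-- one extension round, as B's loop body writes it
def get_sec_step (d : Int) (L : List (List String)) : List (List String) :=
  L.flatMap (fun r => (PySem.List.pyRange 0 d 1).map (fun j => r ++ [PySem.Int.toStr j]))

theorem get_sec_rec_step (d : Int) (k : Int) (hk : 1 < k) :
    get_sec d k = get_sec_step d (get_sec d (k - 1)) := by
  rw [get_sec]
  simp only [if_neg (by omega : ¬ k = 1), if_neg (by omega : ¬ k ≤ 1)]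
  simp only [PySem.List.foldl_append_singleton_eq_map]
  rw [PySem.List.foldl_append_eq_flatMap]
  rfl

theorem get_sec_base (d : Int) :
    get_sec d 1 = (PySem.List.pyRange 0 d 1).map (fun i => [PySem.Int.toStr i]) := by
  rw [get_sec]; simp

theorem get_sec_alt_succ (d : Int) (n : Nat) :
    get_sec_alt d (1 + (n + 1)) = get_sec_step d (get_sec_alt d (1 + n)) := by
  unfold get_sec_alt
  have h1 : (1 : Int) + (n + 1) - 1 = (n : Int) + 1 := by ring
  have h2 : (1 : Int) + n - 1 = (n : Int) := by ring
  rw [h1, h2, PySem.List.pyRange_one_succ_right (by positivity), List.foldl_append]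
  rfl

theorem get_sec_eq_alt_nat (d : Int) (n : Nat) :
    get_sec d (1 + n) = get_sec_alt d (1 + n) := by
  induction n with
  | zero =>
      rw [show (1 : Int) + ((0:Nat):Int) = 1 by norm_num, get_sec_base]
      unfold get_sec_alt
      rw [show (1 : Int) - 1 = 0 by ring, PySem.List.pyRange_one_eq_nil le_rfl]
      rfl
  | succ n ih =>
      rw [show ((n + 1 : Nat) : Int) = (n : Int) + 1 by push_cast; ring]
      rw [get_sec_alt_succ, ← ih,
        get_sec_rec_step d _ (by push_cast; omega),
        show (1 : Int) + (↑n + 1) - 1 = 1 + (n : Int) by ring]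

-- ===== VERDICT (by name: the statement is the Claim_ definition above) =====
theorem get_sec_spec : Claim_equal_get_sec := by
  intro d k _ hk
  unfold Spec_get_sec
  obtain ⟨n, rfl⟩ : ∃ n : Nat, k = 1 + n := ⟨(k - 1).toNat, by unfold Pre_get_sec at hk; omega⟩
  exact get_sec_eq_alt_nat d n
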